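-- pv_equiv track=rewrite | github.com/mikeyhasson/Intro-to-CS | ex8/dup.py | get_intersection_row
-- ===== SOURCE A (Python) =====
-- UNKNOWN_COLOR = -1
--
-- def get_intersection_row(rows):
--     if rows == []:
--         return []
--     new_row = []
--     for i in range(len(rows[0])):
--         val = rows[0][i]
--         for row in rows:
--             if row[i] != val:
--                 val = UNKNOWN_COLOR
--         new_row.append(val)
--     return new_row
-- ===== SOURCE B (Python) =====
-- UNKNOWN_COLOR = -1
--
-- def get_intersection_row(rows):
--     if not rows:
--         return []
--     acc = list(rows[0])
--     for row in rows[1:]: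
--         acc = [a if a == b else UNKNOWN_COLOR for a, b in zip(acc, row)]
--     return acc
-- ===== Notes on version B (the rewrite author's own statement) =====
-- stated objective: alternative
-- what changed: B replaces A's column-index outer loop with inner per-column scan by a row-wise fold: it keeps a running consensus row (rows[0]) and merges each subsequent row into it elementwise (equal keeps the value, mismatch writes the absorbing sentinel), never iterating by column index.
import Mathlib
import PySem

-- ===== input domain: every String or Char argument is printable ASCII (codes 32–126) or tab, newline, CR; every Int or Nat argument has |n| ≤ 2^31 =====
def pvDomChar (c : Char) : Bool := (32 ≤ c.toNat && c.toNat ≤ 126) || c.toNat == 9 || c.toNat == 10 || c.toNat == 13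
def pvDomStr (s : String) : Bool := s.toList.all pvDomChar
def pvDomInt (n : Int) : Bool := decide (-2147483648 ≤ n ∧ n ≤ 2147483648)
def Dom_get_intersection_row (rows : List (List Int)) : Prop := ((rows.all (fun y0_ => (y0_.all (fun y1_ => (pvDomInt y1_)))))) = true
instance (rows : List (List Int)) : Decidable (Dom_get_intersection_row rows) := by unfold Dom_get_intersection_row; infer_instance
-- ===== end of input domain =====

-- B replaces A's column-indexed nested loops by a row-wise fold that merges each row
-- into a running consensus row elementwise (objective: alternative; same value wherever A returns).

-- ===== PORT A =====
def UNKNOWN_COLOR : Int := -1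

def get_intersection_row (rows : List (List Int)) : List Int :=
  if rows = [] then []
  else
    (PySem.List.pyRange 0 ((rows.headD []).length : Int) 1).foldl
      (fun new_row i =>
        let val0 := PySem.List.pyGetD (rows.headD []) i 0
        let val := rows.foldl
          (fun val row => if PySem.List.pyGetD row i 0 ≠ val then UNKNOWN_COLOR else val)
          val0
        new_row ++ [val]) []

-- ===== PORT B =====
-- elementwise merge of the consensus row with the next row (zip truncates, as in Python)
def mergeRow (acc row : List Int) : List Int :=
  (acc.zip row).map (fun p => if p.1 == p.2 then p.1 else UNKNOWN_COLOR)

def get_intersection_row_alt (rows : List (List Int)) : List Int :=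
  match rows with
  | [] => []
  | r :: rs => rs.foldl mergeRow r

-- ===== PRECONDITION & SPEC =====
-- Pre_ excludes exactly the jagged inputs on which A raises IndexError:
-- some row shorter than the first row.
def Pre_get_intersection_row (rows : List (List Int)) : Prop :=
  ∀ row ∈ rows, (rows.headD []).length ≤ row.length
instance (rows : List (List Int)) : Decidable (Pre_get_intersection_row rows) := by
  unfold Pre_get_intersection_row; infer_instance

def pvWitness_get_intersection_row : List (List Int) := [[1, 2, 3], [1, 5, 3]]

def Spec_get_intersection_row (rows : List (List Int)) (out : List Int) : Prop := out = get_intersection_row_alt rows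
instance (rows : List (List Int)) (out : List Int) : Decidable (Spec_get_intersection_row rows out) := by unfold Spec_get_intersection_row; infer_instance

-- ===== CLAIM (what is proved, stated in full; the proofs are below) =====
def Claim_equal_get_intersection_row : Prop := ∀ (rows : List (List Int)), Dom_get_intersection_row rows → Pre_get_intersection_row rows → Spec_get_intersection_row rows (get_intersection_row rows)

-- ===== LEMMAS AND PROOFS =====

-- pyGetD with an in-loop natural-cast index is getD
theorem pyGetD_cast (r : List Int) (k : Nat) :
    PySem.List.pyGetD r (0 + (k : Int)) 0 = r.getD k 0 := by
  rw [zero_add, PySem.List.pyGetD_natCast]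

-- A's loop, written as a map over column indices
theorem A_eq_map (rows : List (List Int)) (hne : rows ≠ []) :
    get_intersection_row rows
      = (List.range (rows.headD []).length).map (fun k =>
          rows.foldl (fun val row => if row.getD k 0 ≠ val then UNKNOWN_COLOR else val)
            ((rows.headD []).getD k 0)) := by
  unfold get_intersection_row
  rw [if_neg hne]
  rw [PySem.List.pyRange_one]
  simp only [Int.sub_zero, Int.toNat_natCast]
  rw [List.foldl_map, PySem.List.foldl_append_singleton_eq_map]
  simp only [List.nil_append]
  apply List.map_congr_left
  intro k _
  rw [pyGetD_cast]
  congr 1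
  funext val row
  rw [pyGetD_cast]

theorem mergeRow_length (acc row : List Int) (h : acc.length ≤ row.length) :
    (mergeRow acc row).length = acc.length := by
  simp [mergeRow]; omega

theorem foldl_mergeRow_length (rs : List (List Int)) (acc : List Int)
    (h : ∀ row ∈ rs, acc.length ≤ row.length) :
    (rs.foldl mergeRow acc).length = acc.length := by
  induction rs generalizing acc with
  | nil => rfl
  | cons r rs ih =>
    have hr := h r List.mem_cons_self
    have hl := mergeRow_length acc r hr
    rw [List.foldl_cons, ih (mergeRow acc r)
      (fun row hrow => by rw [hl]; exact h row (List.mem_cons_of_mem r hrow)), hl]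

theorem mergeRow_getD (acc row : List Int) (k : Nat)
    (hk : k < acc.length) (h : acc.length ≤ row.length) :
    (mergeRow acc row).getD k 0
      = if row.getD k 0 ≠ acc.getD k 0 then UNKNOWN_COLOR else acc.getD k 0 := by
  have hz : k < (acc.zip row).length := by simp; omega
  have hr : k < row.length := by omega
  rw [mergeRow, List.getD_eq_getElem _ _ (by simpa using hz),
      List.getElem_map, List.getElem_zip,
      List.getD_eq_getElem _ _ hk, List.getD_eq_getElem _ _ hr]
  by_cases hab : acc[k] = row[k] <;> simp [hab] <;> omega

-- B's fold, read at one column index, is A's inner per-column fold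
theorem foldl_mergeRow_getD (rs : List (List Int)) (acc : List Int) (k : Nat)
    (hk : k < acc.length) (h : ∀ row ∈ rs, acc.length ≤ row.length) :
    (rs.foldl mergeRow acc).getD k 0
      = rs.foldl (fun val row => if row.getD k 0 ≠ val then UNKNOWN_COLOR else val)
          (acc.getD k 0) := by
  induction rs generalizing acc with
  | nil => rfl
  | cons r rs ih =>
    have hr := h r List.mem_cons_self
    have hl := mergeRow_length acc r hr
    rw [List.foldl_cons, List.foldl_cons,
        ih (mergeRow acc r) (by omega)
          (fun row hrow => by rw [hl]; exact h row (List.mem_cons_of_mem r hrow)),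
        mergeRow_getD acc r k hk hr]

-- ===== VERDICT (by name: the statement is the Claim_ definition above) =====
theorem get_intersection_row_spec : Claim_equal_get_intersection_row := by
  unfold Claim_equal_get_intersection_row Spec_get_intersection_row
  intro rows _ hpre
  cases rows with
  | nil => rfl
  | cons r rs =>
    rw [A_eq_map (r :: rs) (by simp)]
    simp only [List.headD_cons] at hpre ⊢
    have hlen : ∀ row ∈ rs, r.length ≤ row.length :=
      fun row hrow => hpre row (List.mem_cons_of_mem r hrow)
    have hBlen : (rs.foldl mergeRow r).length = r.length :=
      foldl_mergeRow_length rs r hlen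
    apply List.ext_getElem
    · simp [get_intersection_row_alt, hBlen]
    · intro k hk hk'
      simp only [List.getElem_map, List.getElem_range, get_intersection_row_alt]
      have hkr : k < r.length := by simpa using hk
      have hkB : k < (rs.foldl mergeRow r).length := by omega
      rw [show (rs.foldl mergeRow r)[k] = (rs.foldl mergeRow r).getD k 0 from
            (List.getD_eq_getElem _ 0 hkB).symm]
      rw [foldl_mergeRow_getD rs r k hkr hlen]
      rw [List.foldl_cons]
      simp
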